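-- pv_equiv track=rewrite | github.com/Mirvo19/DSS-Literature-Evaluation | utils/random_selector.py | validate_selection
-- ===== SOURCE A (Python) =====
-- from typing import List, Dict, Tuple, Optional
--
-- def validate_selection(
--     selected_students: List[Dict],
--     minimum_required: int = 1
-- ) -> Tuple[bool, Optional[str]]:
--     # code
--     if len(selected_students) < minimum_required:
--         return False, f"Need at least {minimum_required} participant(s)"
--
--     # code
--     student_ids = [s['id'] for s in selected_students]
--     if len(student_ids) != len(set(student_ids)):
--         return False, "Duplicate students in selection"
--
--     return True, None
-- ===== SOURCE B (Python) =====
-- def validate_selection(selected_students, minimum_required=1):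
--     if len(selected_students) < minimum_required:
--         return False, f"Need at least {minimum_required} participant(s)"
--     ids = sorted(s['id'] for s in selected_students)
--     for i in range(1, len(ids)):
--         if ids[i - 1] == ids[i]:
--             return False, "Duplicate students in selection"
--     return True, None
-- ===== Notes on version B (the rewrite author's own statement) =====
-- stated objective: alternative
-- what changed: Duplicate detection is done by sorting the ids and scanning adjacent pairs for equality (sort-then-scan), instead of building the full id list and a set and comparing their sizes; correct because in a sorted list any duplicate pair becomes adjacent.
import Mathlib
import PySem

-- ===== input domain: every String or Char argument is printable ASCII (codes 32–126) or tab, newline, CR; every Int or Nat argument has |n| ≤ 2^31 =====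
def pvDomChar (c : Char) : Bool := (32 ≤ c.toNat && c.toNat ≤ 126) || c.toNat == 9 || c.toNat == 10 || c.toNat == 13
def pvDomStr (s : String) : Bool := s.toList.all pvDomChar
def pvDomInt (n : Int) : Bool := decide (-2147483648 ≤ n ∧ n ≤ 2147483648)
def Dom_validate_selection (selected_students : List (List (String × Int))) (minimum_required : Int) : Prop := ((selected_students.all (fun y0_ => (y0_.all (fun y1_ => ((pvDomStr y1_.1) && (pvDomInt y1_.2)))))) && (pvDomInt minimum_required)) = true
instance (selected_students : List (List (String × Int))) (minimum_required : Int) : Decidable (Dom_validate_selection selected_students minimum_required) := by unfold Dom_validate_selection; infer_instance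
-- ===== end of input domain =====

-- B detects duplicates by sorting the ids and scanning adjacent pairs (sort-then-scan)
-- instead of comparing the id list's length with its set's size (alternative algorithm, not faster).

-- ===== PORT A =====
-- s['id'] raises KeyError when the key is missing; Pre_ excludes that, so the
-- total form (get? …).getD (0 : Int) is exact on Pre_.
def validate_selection (selected_students : List (List (String × Int))) (minimum_required : Int) : Bool × Option String :=
  if (selected_students.length : Int) < minimum_required then
    (false, some ("Need at least " ++ PySem.Int.toStr minimum_required ++ " participant(s)"))
  else
    let student_ids := selected_students.map (fun s => ((PySem.Dict.mk s).get? "id").getD (0 : Int))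
    if student_ids.length ≠ (PySem.Set.ofList student_ids).length then
      (false, some "Duplicate students in selection")
    else
      (true, none)

-- ===== PORT B =====
-- adjacent-pair scan over the sorted id list (Source B's for-loop over range(1, len))
def vsAdj : List Int → Bool × Option String
  | a :: b :: rest =>
    if a = b then (false, some "Duplicate students in selection")
    else vsAdj (b :: rest)
  | _ => (true, none)

def validate_selection_alt (selected_students : List (List (String × Int))) (minimum_required : Int) : Bool × Option String :=
  if (selected_students.length : Int) < minimum_required then
    (false, some ("Need at least " ++ PySem.Int.toStr minimum_required ++ " participant(s)"))
  else
    vsAdj (PySem.List.sorted (selected_students.map (fun s => ((PySem.Dict.mk s).get? "id").getD (0 : Int))) (fun x => x) false)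

-- ===== PRECONDITION & SPEC =====
-- Pre_ excludes exactly the inputs on which A raises KeyError: some student
-- without an 'id' key while the count guard does not fire first.
def Pre_validate_selection (selected_students : List (List (String × Int))) (minimum_required : Int) : Prop :=
  (selected_students.length : Int) < minimum_required ∨
    ∀ s ∈ selected_students, (PySem.Dict.mk s).contains "id" = true
instance (selected_students : List (List (String × Int))) (minimum_required : Int) : Decidable (Pre_validate_selection selected_students minimum_required) := by unfold Pre_validate_selection; infer_instance

def pvWitness_validate_selection : (List (List (String × Int))) × Int := ([[("id", 1)], [("id", 2)]], 1)

def Spec_validate_selection (selected_students : List (List (String × Int))) (minimum_required : Int) (out : Bool × Option String) : Prop := out = validate_selection_alt selected_students minimum_required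
instance (selected_students : List (List (String × Int))) (minimum_required : Int) (out : Bool × Option String) : Decidable (Spec_validate_selection selected_students minimum_required out) := by unfold Spec_validate_selection; infer_instance

-- ===== CLAIM (what is proved, stated in full; the proofs are below) =====
def Claim_equal_validate_selection : Prop := ∀ (selected_students : List (List (String × Int))) (minimum_required : Int), Dom_validate_selection selected_students minimum_required → Pre_validate_selection selected_students minimum_required → Spec_validate_selection selected_students minimum_required (validate_selection selected_students minimum_required)

-- ===== LEMMAS AND PROOFS =====

-- On a (≤)-sorted list, the adjacent scan returns (true, none) iff the list has no duplicates.
theorem vsAdj_pairwise (l : List Int) (hp : l.Pairwise (· ≤ ·)) :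
    vsAdj l = (if l.Nodup then (true, none)
               else (false, some "Duplicate students in selection")) := by
  induction l with
  | nil => simp [vsAdj]
  | cons a tail ih =>
    cases tail with
    | nil => simp [vsAdj]
    | cons b rest =>
      rw [List.pairwise_cons] at hp
      obtain ⟨hab, hp2⟩ := hp
      by_cases h : a = b
      · subst h
        simp [vsAdj]
      · have hnotmem : a ∉ b :: rest := by
          intro hmem
          rcases List.mem_cons.mp hmem with rfl | hmem
          · exact h rfl
          · have h1 : a ≤ b := hab b (List.mem_cons_self ..)
            have h2 : b ≤ a := (List.pairwise_cons.mp hp2).1 a hmem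
            exact h (le_antisymm h1 h2)
        simp only [vsAdj, if_neg h]
        rw [ih hp2]
        simp [List.nodup_cons, hnotmem]

theorem foldl_add_len_le (xs : List Int) :
    ∀ s : PySem.Set Int, (xs.foldl PySem.Set.add s).length ≤ s.length + xs.length := by
  induction xs with
  | nil => intro s; simp
  | cons x rest ih =>
    intro s
    simp only [List.foldl_cons, List.length_cons]
    calc (rest.foldl PySem.Set.add (PySem.Set.add s x)).length
        ≤ (PySem.Set.add s x).length + rest.length := ih _
      _ ≤ s.length + (rest.length + 1) := by
          unfold PySem.Set.add; split <;> simp <;> omega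

theorem foldl_add_len_eq_iff (xs : List Int)
    : ∀ s : PySem.Set Int,
      ((xs.foldl PySem.Set.add s).length = s.length + xs.length) ↔
        (xs.Nodup ∧ ∀ x ∈ xs, x ∉ s) := by
  induction xs with
  | nil => intro s; simp
  | cons x rest ih =>
    intro s
    simp only [List.foldl_cons, List.length_cons, List.nodup_cons, List.mem_cons]
    by_cases hx : x ∈ s
    · have hadd : PySem.Set.add s x = s := by
        unfold PySem.Set.add
        rw [if_pos (by simpa [PySem.Set.contains] using hx)]
      rw [hadd]
      constructor
      · intro h
        have := foldl_add_len_le rest s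
        omega
      · rintro ⟨-, hall⟩
        exact absurd hx (hall x (Or.inl rfl))
    · have hadd : PySem.Set.add s x = s ++ [x] := by
        unfold PySem.Set.add
        rw [if_neg (by simpa [PySem.Set.contains] using hx)]
      rw [hadd]
      rw [show s.length + (rest.length + 1) = (s ++ [x]).length + rest.length by
        simp; omega]
      rw [ih (s ++ [x])]
      constructor
      · rintro ⟨hnd, hall⟩
        refine ⟨⟨fun hmem => ?_, hnd⟩, fun y hy => ?_⟩
        · exact absurd (by simp : x ∈ s ++ [x]) (hall x hmem)
        · rcases hy with rfl | hy
          · exact hx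
          · exact fun hys => (hall y hy) (by simp [hys])
      · rintro ⟨⟨hxr, hnd⟩, hall⟩
        refine ⟨hnd, fun y hy hys => ?_⟩
        simp only [List.mem_append, List.mem_singleton] at hys
        rcases hys with hys | rfl
        · exact hall y (Or.inr hy) hys
        · exact hxr hy

-- ===== VERDICT (by name: the statement is the Claim_ definition above) =====
theorem validate_selection_spec : Claim_equal_validate_selection := by
  intro ss m _ _
  unfold Spec_validate_selection validate_selection validate_selection_alt
  by_cases hlt : (ss.length : Int) < m
  · rw [if_pos hlt, if_pos hlt]
  · rw [if_neg hlt, if_neg hlt]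
    set ids := ss.map (fun s => ((PySem.Dict.mk s).get? "id").getD (0 : Int)) with hids
    have hofl : PySem.Set.ofList ids = ids.foldl PySem.Set.add PySem.Set.empty :=
      PySem.Set.ofList_eq_foldl ids
    have hiff := foldl_add_len_eq_iff ids PySem.Set.empty
    simp only [PySem.Set.empty, List.length_nil, Nat.zero_add, List.not_mem_nil,
      not_false_iff, imp_true_iff, and_true] at hiff
    have hperm : (PySem.List.sorted ids (fun x => x) false).Perm ids :=
      PySem.List.sorted_perm ids (fun x => x) false
    have hpw : (PySem.List.sorted ids (fun x => x) false).Pairwise (fun a b => a ≤ b) :=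
      PySem.List.sorted_pairwise ids (fun x => x)
    rw [vsAdj_pairwise _ hpw]
    simp only [hperm.nodup_iff]
    by_cases hnd : ids.Nodup
    · have hlen : ids.length = (PySem.Set.ofList ids).length := by
        rw [hofl]; exact (hiff.mpr hnd).symm
      rw [if_neg (by omega), if_pos hnd]
    · have hlen : (PySem.Set.ofList ids).length ≠ ids.length := by
        rw [hofl]; exact fun h => hnd (hiff.mp h)
      rw [if_pos (by omega), if_neg hnd]
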